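-- pv_equiv track=rewrite | github.com/OBress/CanvAI | scraping/scripts/2_export_assignments_per_course.py | collect_fieldnames
-- ===== SOURCE A (Python) =====
-- def collect_fieldnames(rows):
--     fields = set()
--     for r in rows:
--         fields.update(r.keys())
--     # keep common fields first
--     preferred = ["id", "name", "description", "due_at", "lock_at", "created_at", "points_possible", "submission_types", "workflow_state", "html_url"]
--     ordered = [f for f in preferred if f in fields]
--     remaining = sorted(fields - set(ordered))
--     return ordered + remaining
-- ===== SOURCE B (Python) =====
-- def collect_fieldnames(rows):
--     fields = set()
--     for r in rows:
--         fields.update(r.keys())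
--     preferred = ["id", "name", "description", "due_at", "lock_at", "created_at", "points_possible", "submission_types", "workflow_state", "html_url"]
--     rank = {name: i for i, name in enumerate(preferred)}
--     return sorted(fields, key=lambda f: (rank.get(f, len(preferred)), f))
-- ===== Notes on version B (the rewrite author's own statement) =====
-- stated objective: idiomatic
-- what changed: B replaces A's partition into a preferred-filter pass plus a separately sorted remainder list by a single sort of the whole field set under a composite key (rank from an enumerate-built dict, alphabetical tie-break).
import Mathlib
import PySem

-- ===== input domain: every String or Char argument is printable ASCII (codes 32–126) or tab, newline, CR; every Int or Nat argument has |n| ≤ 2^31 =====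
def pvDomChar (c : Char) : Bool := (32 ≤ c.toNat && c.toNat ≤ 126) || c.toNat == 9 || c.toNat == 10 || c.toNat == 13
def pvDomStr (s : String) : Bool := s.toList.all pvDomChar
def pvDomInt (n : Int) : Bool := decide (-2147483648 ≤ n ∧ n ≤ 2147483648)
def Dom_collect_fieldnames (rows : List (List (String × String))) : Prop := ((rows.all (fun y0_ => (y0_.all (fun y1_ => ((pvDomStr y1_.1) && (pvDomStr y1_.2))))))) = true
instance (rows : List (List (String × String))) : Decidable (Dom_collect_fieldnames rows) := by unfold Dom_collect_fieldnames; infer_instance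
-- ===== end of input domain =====

-- B re-implements A's "preferred filter ++ sorted remainder" as one composite-key sort (idiomatic; same cost).

-- ===== PORT A =====
-- the shared module constant `preferred`
def pvPreferred : List String :=
  ["id", "name", "description", "due_at", "lock_at", "created_at", "points_possible", "submission_types", "workflow_state", "html_url"]

def collect_fieldnames (rows : List (List (String × String))) : List String :=
  let fields : PySem.Set String :=
    rows.foldl (fun s r => PySem.Set.update s ((PySem.Dict.mk r).keys)) PySem.Set.empty
  let ordered := pvPreferred.filter (fun f => PySem.Set.contains fields f)
  let remaining := PySem.List.sorted (PySem.Set.diff fields (PySem.Set.ofList ordered)) (fun x => x)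
  ordered ++ remaining

-- ===== PORT B =====
-- rank = {name: i for i, name in enumerate(preferred)}
def pvRank : PySem.Dict String Int :=
  (PySem.List.enumerate pvPreferred).foldl (fun d p => d.insert p.2 p.1) PySem.Dict.empty

def collect_fieldnames_alt (rows : List (List (String × String))) : List String :=
  let fields : PySem.Set String :=
    rows.foldl (fun s r => PySem.Set.update s ((PySem.Dict.mk r).keys)) PySem.Set.empty
  PySem.List.sorted2 fields (fun f => PySem.Dict.getD pvRank f (PySem.List.len pvPreferred)) (fun f => f)

-- ===== PRECONDITION & SPEC =====
def Spec_collect_fieldnames (rows : List (List (String × String))) (out : List String) : Prop := out = collect_fieldnames_alt rows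
instance (rows : List (List (String × String))) (out : List String) : Decidable (Spec_collect_fieldnames rows out) := by unfold Spec_collect_fieldnames; infer_instance

-- ===== CLAIM (what is proved, stated in full; the proofs are below) =====
def Claim_equal_collect_fieldnames : Prop := ∀ (rows : List (List (String × String))), Dom_collect_fieldnames rows → Spec_collect_fieldnames rows (collect_fieldnames rows)

-- ===== LEMMAS AND PROOFS =====

-- B's composite key, as one function into the lexicographic order on Int × String
def pvKey (f : String) : Lex (Int × String) :=
  toLex (PySem.Dict.getD pvRank f (PySem.List.len pvPreferred), f)

-- the tuple comparison sorted2 performs is exactly the lexicographic comparison of pvKey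
lemma pv_before_eq (a b : String) :
    (decide (PySem.Dict.getD pvRank a (PySem.List.len pvPreferred) < PySem.Dict.getD pvRank b (PySem.List.len pvPreferred)) ||
      (!decide (PySem.Dict.getD pvRank b (PySem.List.len pvPreferred) < PySem.Dict.getD pvRank a (PySem.List.len pvPreferred)) && decide (a < b))) =
    decide (pvKey a < pvKey b) := by
  rw [Bool.eq_iff_iff]
  simp only [pvKey, Prod.Lex.lt_iff, Bool.or_eq_true, Bool.and_eq_true, Bool.not_eq_eq_eq_not,
    Bool.not_true, decide_eq_true_eq, decide_eq_false_iff_not, ofLex_toLex]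
  constructor
  · rintro (h | ⟨h1, h2⟩)
    · exact Or.inl h
    · by_cases hab : PySem.Dict.getD pvRank a (PySem.List.len pvPreferred) < PySem.Dict.getD pvRank b (PySem.List.len pvPreferred)
      · exact Or.inl hab
      · exact Or.inr ⟨by omega, h2⟩
  · rintro (h | ⟨h1, h2⟩)
    · exact Or.inl h
    · exact Or.inr ⟨by omega, h2⟩

-- B's sorted2 with the two key components is the sort under the single lexicographic key
lemma pv_sorted2_eq_sorted_lex (xs : List String) :
    PySem.List.sorted2 xs (fun f => PySem.Dict.getD pvRank f (PySem.List.len pvPreferred)) (fun f => f) =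
    PySem.List.sorted xs pvKey := by
  have hfun : (fun a b : String =>
      decide (PySem.Dict.getD pvRank a (PySem.List.len pvPreferred) < PySem.Dict.getD pvRank b (PySem.List.len pvPreferred)) ||
        (!decide (PySem.Dict.getD pvRank b (PySem.List.len pvPreferred) < PySem.Dict.getD pvRank a (PySem.List.len pvPreferred)) && decide (a < b))) =
      fun a b => decide (pvKey a < pvKey b) :=
    funext fun a => funext fun b => pv_before_eq a b
  rw [PySem.List.sorted_eq_foldl_insertBy]
  simp only [PySem.List.sorted2, hfun, Bool.false_eq_true, if_false]

-- the field set accumulated by either port is duplicate-free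
lemma pv_fields_nodup_aux (rows : List (List (String × String))) (s : PySem.Set String) (hs : s.Nodup) :
    (rows.foldl (fun s r => PySem.Set.update s (PySem.Dict.mk r).keys) s).Nodup := by
  induction rows generalizing s with
  | nil => exact hs
  | cons r rs ih => exact ih _ (PySem.Set.nodup_update _ _ hs)

lemma pv_fields_nodup (rows : List (List (String × String))) :
    (rows.foldl (fun s r => PySem.Set.update s (PySem.Dict.mk r).keys) PySem.Set.empty).Nodup :=
  pv_fields_nodup_aux rows PySem.Set.empty List.nodup_nil

-- rank lookup of a non-preferred name falls back to len(preferred) = 10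
lemma pv_rank_not_mem {f : String} (h : f ∉ pvPreferred) :
    PySem.Dict.getD pvRank f (PySem.List.len pvPreferred) = 10 := by
  have hk : pvRank.keys = pvPreferred := by decide
  have hnone : pvRank.get? f = none := by
    rw [PySem.Dict.get?_eq_none_iff_not_mem_keys, hk]; exact h
  rw [PySem.Dict.getD_eq_get?_getD, hnone]; rfl

-- every preferred name has rank below the fallback 10
lemma pv_rank_lt_of_mem {f : String} (h : f ∈ pvPreferred) :
    PySem.Dict.getD pvRank f (PySem.List.len pvPreferred) < 10 := by
  revert f; decide

-- ranks strictly increase along the preferred list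
lemma pv_rank_pairwise :
    pvPreferred.Pairwise (fun a b =>
      PySem.Dict.getD pvRank a (PySem.List.len pvPreferred) <
      PySem.Dict.getD pvRank b (PySem.List.len pvPreferred)) := by
  decide

-- the heart: on any duplicate-free field list, A's "ordered ++ sorted remainder" IS the composite-key sort
lemma pv_main (F : List String) (hF : F.Nodup) :
    (pvPreferred.filter (fun f => PySem.Set.contains F f)) ++
      PySem.List.sorted (PySem.Set.diff F (PySem.Set.ofList (pvPreferred.filter (fun f => PySem.Set.contains F f)))) (fun x => x) =
    PySem.List.sorted F pvKey := by
  set O := pvPreferred.filter (fun f => PySem.Set.contains F f) with hO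
  set R := PySem.List.sorted (PySem.Set.diff F (PySem.Set.ofList O)) (fun x => x) with hR
  have hmemO : ∀ x, x ∈ O ↔ x ∈ pvPreferred ∧ x ∈ F := by
    intro x
    simp [hO, List.mem_filter]
  have hmemR : ∀ x, x ∈ R ↔ x ∈ F ∧ x ∉ O := by
    intro x
    simp [hR, PySem.List.mem_sorted, PySem.Set.mem_diff, PySem.Set.mem_ofList]
  have hRnotP : ∀ x ∈ R, x ∉ pvPreferred := by
    intro x hx hxP
    rcases (hmemR x).mp hx with ⟨hxF, hxO⟩
    exact hxO ((hmemO x).mpr ⟨hxP, hxF⟩)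
  have hPnodup : pvPreferred.Nodup := by decide
  have hOnodup : O.Nodup := hPnodup.filter _
  have hRnodup : R.Nodup :=
    ((PySem.List.sorted_perm _ _ _).nodup_iff).mpr (hF.filter _)
  have hperm : (O ++ R).Perm F := by
    rw [List.perm_ext_iff_of_nodup (List.nodup_append.mpr ⟨hOnodup, hRnodup, by
      intro a ha b hb hab
      exact ((hmemR b).mp hb).2 (hab ▸ ha)⟩) hF]
    intro a
    simp only [List.mem_append, hmemO, hmemR]
    constructor
    · rintro (⟨_, h⟩ | ⟨h, _⟩) <;> exact h
    · intro haF
      by_cases haO : a ∈ O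
      · exact Or.inl ((hmemO a).mp haO)
      · exact Or.inr ⟨haF, fun hc => haO ((hmemO a).mpr hc)⟩
  have hpair : (O ++ R).Pairwise (fun a b => pvKey a < pvKey b) := by
    rw [List.pairwise_append]
    refine ⟨?_, ?_, ?_⟩
    · -- within ordered: ranks strictly increase along preferred
      have := List.Pairwise.sublist (List.filter_sublist (p := fun f => PySem.Set.contains F f) (l := pvPreferred)) pv_rank_pairwise
      exact (hO ▸ this).imp fun h => Prod.Lex.lt_iff.mpr (Or.inl h)
    · -- within remaining: rank is constantly 10, names strictly increase
      have hle : R.Pairwise (fun a b : String => a ≤ b) :=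
        PySem.List.sorted_pairwise _ (fun x => x)
      have := hle.and hRnodup
      refine this.imp_of_mem ?_
      intro a b ha hb ⟨hab, hne⟩
      have h10a := pv_rank_not_mem (hRnotP a ha)
      have h10b := pv_rank_not_mem (hRnotP b hb)
      exact Prod.Lex.lt_iff.mpr (Or.inr ⟨h10a.trans h10b.symm, lt_of_le_of_ne hab hne⟩)
    · -- across: preferred ranks are below the fallback 10
      intro a ha b hb
      have h10b := pv_rank_not_mem (hRnotP b hb)
      have hlt := pv_rank_lt_of_mem ((hmemO a).mp ha).1
      exact Prod.Lex.lt_iff.mpr (Or.inl (by simp only [pvKey, ofLex_toLex]; rw [h10b]; exact hlt))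
  exact (PySem.List.sorted_eq_of_perm_of_pairwise_lt F (O ++ R) pvKey hperm hpair).symm

-- ===== VERDICT (by name: the statement is the Claim_ definition above) =====
theorem collect_fieldnames_spec : Claim_equal_collect_fieldnames := by
  intro rows _
  unfold Spec_collect_fieldnames collect_fieldnames collect_fieldnames_alt
  rw [pv_sorted2_eq_sorted_lex]
  exact pv_main _ (pv_fields_nodup rows)
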